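-- pv_equiv track=rewrite | github.com/unitealfa/DMS | core/component/table_extraction/table_extraction_lib.py | _cells_from_anchors
-- ===== SOURCE A (Python) =====
-- from typing import Any, Dict, List, Optional, Tuple
--
-- def _compact_spaces(value: Any) -> str:
--     txt = str(value or "")
--     txt = txt.replace("\xa0", " ").replace("\r", " ").replace("\t", " ")
--     return " ".join(txt.split())
--
-- def _cells_from_anchors(segments: List[Dict[str, Any]], anchors: List[int]) -> List[str]:
--     if not anchors:
--         return []
--     cells = [""] * len(anchors)
--     for seg in segments:
--         if not isinstance(seg, dict):
--             continue
--         text = _compact_spaces(seg.get("text"))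
--         if not text:
--             continue
--         start = int(seg.get("start") or 0)
--         col_idx = min(range(len(anchors)), key=lambda i: abs(start - anchors[i]))
--         if cells[col_idx]:
--             cells[col_idx] = f"{cells[col_idx]} {text}".strip()
--         else:
--             cells[col_idx] = text
--     while cells and not _compact_spaces(cells[-1]):
--         cells.pop()
--     return cells
-- ===== SOURCE B (Python) =====
-- from typing import Any, Dict, List, Optional, Tuple
--
-- def _compact_spaces(value: Any) -> str:
--     txt = str(value or "")
--     txt = txt.replace("\xa0", " ").replace("\r", " ").replace("\t", " ")
--     return " ".join(txt.split())
--
-- def _cells_from_anchors(segments: List[Dict[str, Any]], anchors: List[int]) -> List[str]: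
--     if not anchors:
--         return []
--     # first occurrence index of each distinct anchor value
--     first = {}
--     for i, a in enumerate(anchors):
--         if a not in first:
--             first[a] = i
--     vals = sorted(first)  # distinct anchor values, ascending
--     n = len(vals)
--
--     def nearest(start: int) -> int:
--         # binary search: lo = leftmost position with vals[lo] >= start
--         lo, hi = 0, n
--         while lo < hi:
--             mid = (lo + hi) // 2
--             if vals[mid] < start:
--                 lo = mid + 1
--             else:
--                 hi = mid
--         if lo == 0:
--             return first[vals[0]]
--         if lo == n:
--             return first[vals[n - 1]]
--         a, b = vals[lo - 1], vals[lo]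
--         da, db = start - a, b - start
--         if da < db:
--             return first[a]
--         if db < da:
--             return first[b]
--         return min(first[a], first[b])
--
--     # group the compacted texts per column, join once at the end
--     parts = [[] for _ in anchors]
--     for seg in segments:
--         if not isinstance(seg, dict):
--             continue
--         text = _compact_spaces(seg.get("text"))
--         if not text:
--             continue
--         parts[nearest(int(seg.get("start") or 0))].append(text)
--     cells = [" ".join(p) for p in parts]
--     while cells and not _compact_spaces(cells[-1]):
--         cells.pop()
--     return cells
-- ===== Notes on version B (the rewrite author's own statement) =====
-- stated objective: alternative
-- what changed: B precomputes the first-occurrence index of each distinct anchor and sorts the distinct values once, then finds each segment's nearest anchor by hand-rolled binary search (equidistant ties resolved to the smaller first-occurrence index) instead of A's per-segment linear argmin, and it groups the compacted texts per column and joins each group once at the end instead of A's repeated format-and-strip cell updates.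
import Mathlib
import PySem

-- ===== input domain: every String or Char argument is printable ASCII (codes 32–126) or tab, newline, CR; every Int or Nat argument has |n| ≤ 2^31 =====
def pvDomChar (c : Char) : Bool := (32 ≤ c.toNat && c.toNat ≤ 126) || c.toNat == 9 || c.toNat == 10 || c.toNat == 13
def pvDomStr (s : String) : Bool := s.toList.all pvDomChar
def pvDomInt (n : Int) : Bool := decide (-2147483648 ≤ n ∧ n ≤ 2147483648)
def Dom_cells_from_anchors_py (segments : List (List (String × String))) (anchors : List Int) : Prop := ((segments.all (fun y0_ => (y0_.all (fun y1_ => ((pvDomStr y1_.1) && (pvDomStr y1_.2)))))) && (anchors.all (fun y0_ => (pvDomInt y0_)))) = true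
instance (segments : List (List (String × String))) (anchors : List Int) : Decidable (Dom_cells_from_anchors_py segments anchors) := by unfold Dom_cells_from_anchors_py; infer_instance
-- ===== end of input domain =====

-- B finds each segment's nearest anchor by binary search over the sorted distinct anchor values
-- (with a precomputed first-occurrence index) instead of A's per-segment linear argmin, and it
-- groups texts per column and joins once instead of A's repeated format-and-strip (objective: alternative).

-- ===== PORT A =====

-- _compact_spaces (module helper shared by both Pythons); str(value or "") on a string is the string itself
def pvCompact (v : String) : String :=
  let txt := PySem.Str.replace (PySem.Str.replace (PySem.Str.replace v "\u00A0" " ") "\r" " ") "\t" " "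
  PySem.Str.join " " (PySem.Str.split₀ txt)

-- int(seg.get("start") or 0); a ValueError of int() is excluded by Pre_ (the port defaults to 0 there)
def pvStart (seg : List (String × String)) : Int :=
  let s := (PySem.Dict.mk seg).getD "start" ""
  if s = "" then 0 else (PySem.Int.ofStr? s).getD 0

-- `while cells and not _compact_spaces(cells[-1]): cells.pop()`  (identical tail loop of both Pythons)
def pvPopWhile (cells : List String) : List String :=
  match hl : cells.getLast? with
  | none => cells
  | some lastv => if pvCompact lastv = "" then pvPopWhile cells.dropLast else cells
termination_by cells.length
decreasing_by
  have hne : cells ≠ [] := by intro h; subst h; simp at hl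
  have := List.length_pos_of_ne_nil hne
  simp [List.length_dropLast]; omega

def cells_from_anchors_py (segments : List (List (String × String))) (anchors : List Int) : List String :=
  if anchors = [] then []
  else
    pvPopWhile (segments.foldl (fun cells seg =>
      let text := pvCompact ((PySem.Dict.mk seg).getD "text" "")
      if text = "" then cells
      else
        let start := pvStart seg
        -- min(range(len(anchors)), key=lambda i: abs(start - anchors[i])); the range is nonempty here
        let colIdx := PySem.List.minD (PySem.List.pyRange 0 (anchors.length : Int) 1)
          (fun i => |start - PySem.List.pyGetD anchors i 0|) 0
        let cur := PySem.List.pyGetD cells colIdx ""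
        -- colIdx comes from range(len(anchors)), hence 0 ≤ colIdx: .toNat is exact
        if cur ≠ "" then cells.set colIdx.toNat (PySem.Str.strip (cur ++ " " ++ text))
        else cells.set colIdx.toNat text)
      (List.replicate anchors.length ""))

-- ===== PORT B =====

-- first = {}; for i, a in enumerate(anchors): if a not in first: first[a] = i
def pvFirstDict (anchors : List Int) : PySem.Dict Int Int :=
  (PySem.List.enumerate anchors 0).foldl
    (fun d p => if d.contains p.2 then d else d.insert p.2 p.1) PySem.Dict.empty

-- the hand-written lower-bound binary-search loop of Source B (lo, hi, mid = (lo+hi)//2)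
def pvBisect (vals : List Int) (start lo hi : Int) : Int :=
  if h : lo < hi then
    let mid := PySem.Int.floordiv (lo + hi) 2
    if PySem.List.pyGetD vals mid 0 < start then pvBisect vals start (mid + 1) hi
    else pvBisect vals start lo mid
  else lo
termination_by (hi - lo).toNat
decreasing_by
  · have hb := PySem.Int.floordiv_two_mid_bounds (le_of_lt h)
    omega
  · have hlt : PySem.Int.floordiv (lo + hi) 2 < hi := by
      rw [PySem.Int.floordiv_lt_iff_lt_mul (by norm_num)]; omega
    omega

-- nearest(start): vals are the sorted distinct anchor values, first their first-occurrence indices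
-- (every value looked up is a key of `first`, so dict KeyError is impossible; getD is exact)
def pvNearest (vals : List Int) (first : PySem.Dict Int Int) (start : Int) : Int :=
  let n : Int := vals.length
  let lo := pvBisect vals start 0 n
  if lo = 0 then first.getD (PySem.List.pyGetD vals 0 0) 0
  else if lo = n then first.getD (PySem.List.pyGetD vals (n - 1) 0) 0
  else
    let a := PySem.List.pyGetD vals (lo - 1) 0
    let b := PySem.List.pyGetD vals lo 0
    let da := start - a
    let db := b - start
    if da < db then first.getD a 0
    else if db < da then first.getD b 0
    else min (first.getD a 0) (first.getD b 0)

def cells_from_anchors_py_alt (segments : List (List (String × String))) (anchors : List Int) : List String :=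
  if anchors = [] then []
  else
    let first := pvFirstDict anchors
    let vals := PySem.List.sorted first.keys (fun x => x) false
    let parts := segments.foldl (fun parts seg =>
      let text := pvCompact ((PySem.Dict.mk seg).getD "text" "")
      if text = "" then parts
      else
        -- parts[nearest(int(seg.get("start") or 0))].append(text)
        let col := pvNearest vals first (pvStart seg)
        parts.set col.toNat (PySem.List.pyGetD parts col [] ++ [text]))
      (List.replicate anchors.length ([] : List String))
    pvPopWhile (parts.map (fun p => PySem.Str.join " " p))

-- ===== PRECONDITION & SPEC =====

-- Pre_ excludes exactly the inputs where A raises ValueError: a segment whose compacted text is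
-- nonempty but whose "start" value is a nonempty string that int() cannot parse.
def Pre_cells_from_anchors_py (segments : List (List (String × String))) (anchors : List Int) : Prop :=
  ∀ seg ∈ segments, pvCompact ((PySem.Dict.mk seg).getD "text" "") ≠ "" →
    ((PySem.Dict.mk seg).getD "start" "" = "" ∨ (PySem.Int.ofStr? ((PySem.Dict.mk seg).getD "start" "")).isSome)
instance (segments : List (List (String × String))) (anchors : List Int) : Decidable (Pre_cells_from_anchors_py segments anchors) := by unfold Pre_cells_from_anchors_py; infer_instance

def pvWitness_cells_from_anchors_py : (List (List (String × String))) × List Int :=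
  ([[("text", "a"), ("start", "3")]], [1, 5])

def Spec_cells_from_anchors_py (segments : List (List (String × String))) (anchors : List Int) (out : List String) : Prop := out = cells_from_anchors_py_alt segments anchors
instance (segments : List (List (String × String))) (anchors : List Int) (out : List String) : Decidable (Spec_cells_from_anchors_py segments anchors out) := by unfold Spec_cells_from_anchors_py; infer_instance

-- ===== CLAIM (what is proved, stated in full; the proofs are below) =====
def Claim_equal_cells_from_anchors_py : Prop := ∀ (segments : List (List (String × String))) (anchors : List Int), Dom_cells_from_anchors_py segments anchors → Pre_cells_from_anchors_py segments anchors → Spec_cells_from_anchors_py segments anchors (cells_from_anchors_py segments anchors)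

-- ===== LEMMAS AND PROOFS =====

-- cleanliness of compacted strings (proof-only notions)
def pvCleanC (c : List Char) : Prop :=
  c ≠ [] ∧ PySem.Chars.isspace c.headI = false ∧ PySem.Chars.isspace c.reverse.headI = false
def pvCleanS (s : String) : Prop := pvCleanC s.toList

lemma pv_headI_append {α} [Inhabited α] (a b : List α) (h : a ≠ []) :
    (a ++ b).headI = a.headI := by
  cases a with
  | nil => exact absurd rfl h
  | cons x t => rfl

lemma pv_go_words : ∀ (s cur acc : _), (∀ c ∈ cur, PySem.Chars.isspace c = false) →
    (∀ w ∈ acc, w ≠ [] ∧ ∀ c ∈ w, PySem.Chars.isspace c = false) →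
    ∀ w ∈ PySem.Chars.split₀.go s cur acc, w ≠ [] ∧ ∀ c ∈ w, PySem.Chars.isspace c = false := by
  intro s
  induction s with
  | nil =>
    intro cur acc hcur hacc w hw
    rw [PySem.Chars.split₀.go] at hw
    by_cases hc : cur.isEmpty
    · rw [if_pos hc, List.mem_reverse] at hw
      exact hacc w hw
    · rw [if_neg hc, List.mem_reverse] at hw
      rcases List.mem_cons.mp hw with hw | hw
      · subst hw
        constructor
        · simp [List.isEmpty_iff] at hc
          simpa using hc
        · intro c hc'
          exact hcur c (by simpa using hc')
      · exact hacc w hw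
  | cons c rest ih =>
    intro cur acc hcur hacc w hw
    rw [PySem.Chars.split₀.go] at hw
    by_cases hs : PySem.Chars.isspace c
    · rw [if_pos hs] at hw
      by_cases hc : cur.isEmpty
      · rw [if_pos hc] at hw
        exact ih [] acc (by simp) hacc w hw
      · rw [if_neg hc] at hw
        refine ih [] (cur.reverse :: acc) (by simp) ?_ w hw
        intro u hu
        rcases List.mem_cons.mp hu with hu | hu
        · subst hu
          constructor
          · simp [List.isEmpty_iff] at hc; simpa using hc
          · intro d hd; exact hcur d (by simpa using hd)
        · exact hacc u hu
    · rw [if_neg hs] at hw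
      refine ih (c :: cur) acc ?_ hacc w hw
      intro d hd
      rcases List.mem_cons.mp hd with hd | hd
      · subst hd; simpa using hs
      · exact hcur d hd

lemma pv_split₀_words (s : List Char) :
    ∀ w ∈ PySem.Chars.split₀ s, w ≠ [] ∧ ∀ c ∈ w, PySem.Chars.isspace c = false :=
  pv_go_words s [] [] (by simp) (by simp)

lemma pv_join_clean : ∀ (ws : List (List Char)), ws ≠ [] → (∀ w ∈ ws, pvCleanC w) →
    pvCleanC (PySem.Chars.join [' '] ws) := by
  intro ws
  induction ws with
  | nil => intro h _; exact absurd rfl h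
  | cons w ws ih =>
    intro _ hcl
    cases ws with
    | nil =>
      rw [PySem.Chars.join_singleton]
      exact hcl w (by simp)
    | cons u us =>
      rw [PySem.Chars.join_cons_cons]
      obtain ⟨hw1, hw2, hw3⟩ := hcl w (by simp)
      obtain ⟨hj1, hj2, hj3⟩ := ih (by simp) (fun v hv => hcl v (by simp [hv]))
      refine ⟨by simp [hw1], ?_, ?_⟩
      · rw [List.append_assoc, pv_headI_append _ _ hw1]
        exact hw2
      · rw [List.reverse_append, List.reverse_append,
          pv_headI_append _ _ (by simpa using hj1)]
        exact hj3

lemma pv_clean_of_nospace (w : List Char) (h1 : w ≠ [])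
    (h2 : ∀ c ∈ w, PySem.Chars.isspace c = false) : pvCleanC w := by
  refine ⟨h1, ?_, ?_⟩
  · cases w with
    | nil => exact absurd rfl h1
    | cons x t => exact h2 x (by simp)
  · cases hw : w.reverse with
    | nil => exact absurd (by simpa using hw) h1
    | cons x t =>
      exact h2 x (by rw [← List.mem_reverse, hw]; simp)

lemma pv_compact_clean (v : String) (h : pvCompact v ≠ "") : pvCleanS (pvCompact v) := by
  rw [pvCompact] at h ⊢
  set txt := PySem.Str.replace (PySem.Str.replace (PySem.Str.replace v "\u00A0" " ") "\r" " ") "\t" " " with htxt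
  rw [pvCleanS, PySem.Str.toList_join, PySem.Str.split₀_map_toList]
  have hws : PySem.Chars.split₀ txt.toList ≠ [] := by
    intro hnil
    apply h
    rw [← String.toList_inj, PySem.Str.toList_join, PySem.Str.split₀_map_toList, hnil,
      PySem.Chars.join_nil, String.toList_empty]
  refine pv_join_clean _ hws ?_
  intro w hw
  obtain ⟨h1, h2⟩ := pv_split₀_words txt.toList w hw
  exact pv_clean_of_nospace w h1 h2

lemma pv_strip_clean (c : List Char) (h : pvCleanC c) : PySem.Chars.strip c = c := by
  obtain ⟨h1, h2, h3⟩ := h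
  rw [PySem.Chars.strip, PySem.Chars.lstrip]
  have hls : List.dropWhile PySem.Chars.isspace c = c := by
    cases c with
    | nil => rfl
    | cons x t => rw [List.dropWhile_cons_of_neg (by simpa using h2)]
  rw [hls, PySem.Chars.rstrip]
  have hrs : List.dropWhile PySem.Chars.isspace c.reverse = c.reverse := by
    cases hc : c.reverse with
    | nil => rfl
    | cons x t =>
      rw [List.dropWhile_cons_of_neg]
      rw [hc] at h3
      simpa using h3
  rw [hrs, List.reverse_reverse]

lemma pv_strip_noop (s : String) (h : pvCleanS s) : PySem.Str.strip s = s := by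
  rw [← String.toList_inj, PySem.Str.toList_strip]
  exact pv_strip_clean _ h

lemma pv_joinS_nil : PySem.Str.join " " [] = "" := by
  rw [← String.toList_inj, PySem.Str.toList_join]
  simp [PySem.Chars.join_nil]

lemma pv_joinS_singleton (t : String) : PySem.Str.join " " [t] = t := by
  rw [← String.toList_inj, PySem.Str.toList_join]
  simp [PySem.Chars.join_singleton]

lemma pv_join_append_chars (sep : List Char) :
    ∀ (ws : List (List Char)), ws ≠ [] → ∀ t,
      PySem.Chars.join sep (ws ++ [t]) = PySem.Chars.join sep ws ++ sep ++ t := by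
  intro ws
  induction ws with
  | nil => intro h; exact absurd rfl h
  | cons w ws ih =>
    intro _ t
    cases ws with
    | nil => rw [List.cons_append, List.nil_append, PySem.Chars.join_cons_cons,
        PySem.Chars.join_singleton, PySem.Chars.join_singleton]
    | cons u us =>
      have e1 : (w :: u :: us) ++ [t] = w :: u :: (us ++ [t]) := by simp
      rw [e1, PySem.Chars.join_cons_cons]
      have e2 : u :: (us ++ [t]) = (u :: us) ++ [t] := by simp
      rw [e2, ih (by simp) t, PySem.Chars.join_cons_cons]
      simp [List.append_assoc]

lemma pv_joinS_append (p : List String) (hp : p ≠ []) (t : String) :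
    PySem.Str.join " " (p ++ [t]) = PySem.Str.join " " p ++ " " ++ t := by
  rw [← String.toList_inj, PySem.Str.toList_join, String.toList_append, String.toList_append,
    PySem.Str.toList_join, List.map_append]
  have : (" " : String).toList = [' '] := rfl
  rw [this]
  simpa using pv_join_append_chars [' '] (p.map String.toList) (by simpa using hp) t.toList

lemma pv_joinS_clean (p : List String) (hp : p ≠ []) (hcl : ∀ t ∈ p, pvCleanS t) :
    pvCleanS (PySem.Str.join " " p) := by
  rw [pvCleanS, PySem.Str.toList_join]
  have : (" " : String).toList = [' '] := rfl
  rw [this]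
  refine pv_join_clean _ (by simpa using hp) ?_
  intro w hw
  obtain ⟨t, ht, rfl⟩ := List.mem_map.mp hw
  exact hcl t ht

lemma pv_joinS_ne_empty (p : List String) (hp : p ≠ []) (hcl : ∀ t ∈ p, pvCleanS t) :
    PySem.Str.join " " p ≠ "" := by
  intro he
  have := (pv_joinS_clean p hp hcl).1
  rw [he] at this
  exact this String.toList_empty

lemma pv_clean_append (a b : String) (ha : pvCleanS a) (hb : pvCleanS b) :
    pvCleanS (a ++ " " ++ b) := by
  obtain ⟨ha1, ha2, ha3⟩ := ha
  obtain ⟨hb1, hb2, hb3⟩ := hb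
  rw [pvCleanS, String.toList_append, String.toList_append]
  have hsp : (" " : String).toList = [' '] := rfl
  rw [hsp]
  refine ⟨by simp [ha1], ?_, ?_⟩
  · rw [List.append_assoc, pv_headI_append _ _ ha1]
    exact ha2
  · rw [List.reverse_append, List.reverse_append,
      pv_headI_append _ _ (by simpa using hb1)]
    exact hb3

lemma pv_pyGetD_mem {α : Type} (xs : List α) (i : Int) (d : α) :
    PySem.List.pyGetD xs i d = d ∨ PySem.List.pyGetD xs i d ∈ xs := by
  rw [PySem.List.pyGetD]
  cases hg : PySem.List.pyGet? xs i with
  | none => left; rfl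
  | some x =>
    right
    rw [PySem.List.pyGet?] at hg
    cases hi : PySem.List.pyIdx? xs.length i with
    | none => rw [hi] at hg; simp at hg
    | some k =>
      rw [hi] at hg
      simp only [Option.bind_some] at hg
      exact List.mem_of_getElem? (by simpa using hg)

lemma pv_fold_parts (colF : List (String × String) → Int)
    (segs : List (List (String × String))) :
    ∀ (parts : List (List String)), (∀ p ∈ parts, ∀ t ∈ p, pvCleanS t) →
    segs.foldl (fun cells seg =>
      let text := pvCompact ((PySem.Dict.mk seg).getD "text" "")
      if text = "" then cells
      else
        let colIdx := colF seg
        let cur := PySem.List.pyGetD cells colIdx ""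
        if cur ≠ "" then cells.set colIdx.toNat (PySem.Str.strip (cur ++ " " ++ text))
        else cells.set colIdx.toNat text)
      (parts.map (fun p => PySem.Str.join " " p))
    = (segs.foldl (fun parts seg =>
        let text := pvCompact ((PySem.Dict.mk seg).getD "text" "")
        if text = "" then parts
        else parts.set (colF seg).toNat (PySem.List.pyGetD parts (colF seg) [] ++ [text]))
        parts).map (fun p => PySem.Str.join " " p) := by
  induction segs with
  | nil => intro parts _; simp
  | cons seg segs ih =>
    intro parts hinv
    simp only [List.foldl_cons]
    set text := pvCompact ((PySem.Dict.mk seg).getD "text" "") with htext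
    by_cases ht : text = ""
    · rw [if_pos ht, if_pos ht]
      exact ih parts hinv
    · rw [if_neg ht, if_neg ht]
      set i := colF seg with hi
      set p := PySem.List.pyGetD parts i [] with hp
      have hpmem : ∀ t ∈ p, pvCleanS t := by
        rcases pv_pyGetD_mem parts i [] with hd | hm
        · rw [hp, hd]; intro t htm; simp at htm
        · exact hinv p (hp ▸ hm)
      have hcur : PySem.List.pyGetD (parts.map (fun q => PySem.Str.join " " q)) i ""
          = PySem.Str.join " " p := by
        rw [show ("" : String) = PySem.Str.join " " [] from pv_joinS_nil.symm,
          PySem.List.pyGetD_map (fun q => PySem.Str.join " " q) parts i []]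
      rw [hcur]
      by_cases hpn : p = []
      · have hje : PySem.Str.join " " p = "" := by rw [hpn, pv_joinS_nil]
        rw [if_neg (by simp [hje])]
        have hset : (parts.set i.toNat (p ++ [text])).map (fun q => PySem.Str.join " " q)
            = (parts.map (fun q => PySem.Str.join " " q)).set i.toNat text := by
          rw [List.map_set, hpn, List.nil_append, pv_joinS_singleton]
        rw [← hset]
        refine ih _ ?_
        intro q hq t htq
        rcases List.mem_or_eq_of_mem_set hq with hq' | hq'
        · exact hinv q hq' t htq
        · subst hq'
          rcases List.mem_append.mp htq with h' | h'
          · exact hpmem t h'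
          · simp at h'; subst h'; exact pv_compact_clean _ ht
      · have hjne : PySem.Str.join " " p ≠ "" := pv_joinS_ne_empty p hpn hpmem
        rw [if_pos hjne]
        have hclean : pvCleanS (PySem.Str.join " " p ++ " " ++ text) :=
          pv_clean_append _ _ (pv_joinS_clean p hpn hpmem) (pv_compact_clean _ ht)
        rw [pv_strip_noop _ hclean, ← pv_joinS_append p hpn text, ← List.map_set]
        refine ih _ ?_
        intro q hq t htq
        rcases List.mem_or_eq_of_mem_set hq with hq' | hq'
        · exact hinv q hq' t htq
        · subst hq'
          rcases List.mem_append.mp htq with h' | h'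
          · exact hpmem t h'
          · simp at h'; subst h'; exact pv_compact_clean _ ht


-- min? keeps its accumulator when nothing beats it strictly
lemma pv_fold_min_keep {α : Type} (key : α → Int) (t : List α) :
    ∀ (m : α), (∀ y ∈ t, key m ≤ key y) →
      t.foldl (fun acc x => match acc with
        | none => some x
        | some m => if key x < key m then some x else some m) (some m) = some m := by
  induction t with
  | nil => intro m _; rfl
  | cons y t ih =>
    intro m hm
    have h1 : ¬ key y < key m := not_lt.mpr (hm y (by simp))
    simp only [List.foldl_cons, if_neg h1]
    exact ih m (fun z hz => hm z (by simp [hz]))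

-- once a strictly-better element x is ahead, the fold lands on x
lemma pv_fold_min_reach {α : Type} (key : α → Int) (x : α) (suf : List α)
    (h2 : ∀ s ∈ suf, key x ≤ key s) :
    ∀ (pre : List α) (m : α), key x < key m → (∀ p ∈ pre, key x < key p) →
      (pre ++ x :: suf).foldl (fun acc y => match acc with
        | none => some y
        | some m => if key y < key m then some y else some m) (some m) = some x := by
  intro pre
  induction pre with
  | nil =>
    intro m hxm _
    simp only [List.nil_append, List.foldl_cons, if_pos hxm]
    exact pv_fold_min_keep key suf x h2
  | cons p pre ih =>
    intro m hxm hpre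
    simp only [List.cons_append, List.foldl_cons]
    by_cases hp : key p < key m
    · rw [if_pos hp]
      exact ih p (hpre p (by simp)) (fun q hq => hpre q (by simp [hq]))
    · rw [if_neg hp]
      exact ih m hxm (fun q hq => hpre q (by simp [hq]))

-- min? returns x when everything before x is strictly larger and nothing after is smaller
lemma pv_min?_split {α : Type} (key : α → Int) (pre : List α) (x : α) (suf : List α)
    (h1 : ∀ p ∈ pre, key x < key p) (h2 : ∀ s ∈ suf, key x ≤ key s) :
    PySem.List.min? (pre ++ x :: suf) key = some x := by
  cases pre with
  | nil =>
    simp only [PySem.List.min?, List.nil_append, List.foldl_cons]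
    exact pv_fold_min_keep key suf x h2
  | cons p pre =>
    simp only [PySem.List.min?, List.cons_append, List.foldl_cons]
    exact pv_fold_min_reach key x suf h2 pre p (h1 p (by simp))
      (fun q hq => h1 q (by simp [hq]))

-- A's argmin over range(n): the first index realising the minimum
lemma pv_minD_range_eq (n : Int) (K : Int → Int) (i : Int) (h0 : 0 ≤ i) (hn : i < n)
    (hmin : ∀ j, 0 ≤ j → j < n → K i ≤ K j)
    (hfirst : ∀ j, 0 ≤ j → j < i → K i < K j) :
    PySem.List.minD (PySem.List.pyRange 0 n 1) K 0 = i := by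
  have hsplit : PySem.List.pyRange 0 n 1
      = PySem.List.pyRange 0 i 1 ++ PySem.List.pyRange i n 1 :=
    PySem.List.pyRange_one_append 0 i n h0 (le_of_lt hn)
  have hcons : PySem.List.pyRange i n 1 = i :: PySem.List.pyRange (i+1) n 1 :=
    PySem.List.pyRange_one_cons hn
  rw [PySem.List.minD, hsplit, hcons, pv_min?_split]
  · rfl
  · intro p hp
    rw [PySem.List.mem_pyRange_one] at hp
    exact hfirst p hp.1 hp.2
  · intro s hs
    rw [PySem.List.mem_pyRange_one] at hs
    exact hmin s (by omega) hs.2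

-- the first-occurrence dict: lookups are index? (offset by the enumerate start)
lemma pv_firstFold_get? (l : List Int) :
    ∀ (s : Int) (d : PySem.Dict Int Int) (v : Int),
      ((PySem.List.enumerate l s).foldl
          (fun d p => if d.contains p.2 then d else d.insert p.2 p.1) d).get? v
      = (match d.get? v with
         | some w => some w
         | none => (PySem.List.index? l v).map (fun k => s + (k : Int))) := by
  induction l with
  | nil =>
    intro s d v
    rw [PySem.List.enumerate_nil]
    simp only [List.foldl_nil]
    cases hg : d.get? v with
    | some w => rfl
    | none => simp
  | cons a l ih =>
    intro s d v
    rw [PySem.List.enumerate_cons]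
    simp only [List.foldl_cons]
    by_cases hc : d.contains a
    · rw [if_pos hc, ih (s+1) d v]
      by_cases hv : v = a
      · subst hv
        have : (d.get? v).isSome := by rw [← PySem.Dict.contains_eq_isSome_get?]; exact hc
        cases hg : d.get? v with
        | none => rw [hg] at this; simp at this
        | some w => rfl
      · rw [PySem.List.index?_cons_of_ne l (fun h => hv h.symm)]
        cases hg : d.get? v with
        | some w => rfl
        | none =>
          cases hk : PySem.List.index? l v with
          | none => rfl
          | some k => simp; ring
    · rw [if_neg hc]
      rw [ih (s+1) (d.insert a s) v]
      by_cases hv : v = a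
      · subst hv
        rw [PySem.Dict.get?_insert_self]
        have hg : d.get? v = none := (PySem.Dict.get?_eq_none_iff_contains d v).mpr (by simpa using hc)
        rw [hg, PySem.List.index?_cons_self]
        simp
      · rw [PySem.Dict.get?_insert_of_ne d s hv]
        rw [PySem.List.index?_cons_of_ne l (fun h => hv h.symm)]
        cases hg : d.get? v with
        | some w => rfl
        | none =>
          cases hk : PySem.List.index? l v with
          | none => rfl
          | some k => simp; ring

lemma pv_firstFold_keys (l : List Int) :
    ∀ (s : Int) (d : PySem.Dict Int Int),
      ((PySem.List.enumerate l s).foldl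
          (fun d p => if d.contains p.2 then d else d.insert p.2 p.1) d).keys
      = l.foldl PySem.Set.add d.keys := by
  induction l with
  | nil => intro s d; rw [PySem.List.enumerate_nil]; rfl
  | cons a l ih =>
    intro s d
    rw [PySem.List.enumerate_cons]
    simp only [List.foldl_cons]
    by_cases hc : d.contains a
    · rw [if_pos hc, ih (s+1) d]
      have : PySem.Set.add d.keys a = d.keys := by
        have hm : a ∈ d.keys := (PySem.Dict.contains_iff_mem_keys d a).mp hc
        simp [PySem.Set.add, PySem.Set.contains, hm]
      rw [this]
    · rw [if_neg hc, ih (s+1) (d.insert a s)]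
      have hk : (d.insert a s).keys = d.keys ++ [a] :=
        PySem.Dict.keys_insert_of_not_contains d s (by simpa using hc)
      have : PySem.Set.add d.keys a = d.keys ++ [a] := by
        have hm : a ∉ d.keys := fun hm => (by simpa using hc : ¬ _) ((PySem.Dict.contains_iff_mem_keys d a).mpr hm)
        simp [PySem.Set.add, PySem.Set.contains, hm]
      rw [hk, this]

lemma pv_firstDict_keys (anchors : List Int) :
    (pvFirstDict anchors).keys = PySem.Set.ofList anchors := by
  rw [pvFirstDict, pv_firstFold_keys anchors 0 PySem.Dict.empty, PySem.Dict.keys_empty,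
    PySem.Set.ofList_eq_foldl]

lemma pv_firstDict_getD (anchors : List Int) (v : Int) (k : Nat)
    (hk : PySem.List.index? anchors v = some k) :
    (pvFirstDict anchors).getD v 0 = (k : Int) := by
  rw [PySem.Dict.getD_eq_get?_getD, pvFirstDict, pv_firstFold_get? anchors 0 PySem.Dict.empty v,
    PySem.Dict.get?_empty, hk]
  simp

-- binary-search postcondition on a strictly sorted list
lemma pv_sorted_mono (vals : List Int) (hs : vals.Pairwise (· < ·))
    (j k : Int) (h0 : 0 ≤ j) (hjk : j ≤ k) (hk : k < (vals.length : Int)) :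
    PySem.List.pyGetD vals j 0 ≤ PySem.List.pyGetD vals k 0 := by
  rw [PySem.List.pyGetD_eq_getElem vals 0 h0 (by omega),
      PySem.List.pyGetD_eq_getElem vals 0 (by omega) hk]
  rcases eq_or_lt_of_le hjk with h | h
  · subst h; exact le_refl _
  · exact le_of_lt ((List.pairwise_iff_getElem.mp hs) j.toNat k.toNat (by omega) (by omega) (by omega))

lemma pv_bisect_spec (vals : List Int) (hs : vals.Pairwise (· < ·)) (start : Int) :
    ∀ (N : Nat) (lo hi : Int), (hi - lo).toNat ≤ N → 0 ≤ lo → lo ≤ hi → hi ≤ (vals.length : Int) →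
      lo ≤ pvBisect vals start lo hi ∧ pvBisect vals start lo hi ≤ hi ∧
      (∀ k : Int, lo ≤ k → k < pvBisect vals start lo hi → PySem.List.pyGetD vals k 0 < start) ∧
      (∀ k : Int, pvBisect vals start lo hi ≤ k → k < hi → start ≤ PySem.List.pyGetD vals k 0) := by
  intro N
  induction N with
  | zero =>
    intro lo hi hN h0 hlh hhi
    have hle : ¬ lo < hi := by omega
    rw [pvBisect, dif_neg hle]
    exact ⟨le_refl _, hlh, fun k hk1 hk2 => by omega, fun k hk1 hk2 => by omega⟩
  | succ N ih =>
    intro lo hi hN h0 hlh hhi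
    by_cases h : lo < hi
    · rw [pvBisect, dif_pos h]
      have hb := PySem.Int.floordiv_two_mid_bounds (le_of_lt h)
      have hmidlt : PySem.Int.floordiv (lo + hi) 2 < hi := by
        rw [PySem.Int.floordiv_lt_iff_lt_mul (by norm_num)]; omega
      set mid := PySem.Int.floordiv (lo + hi) 2 with hmid
      by_cases hv : PySem.List.pyGetD vals mid 0 < start
      · rw [if_pos hv]
        obtain ⟨r1, r2, r3, r4⟩ := ih (mid + 1) hi (by omega) (by omega) (by omega) hhi
        refine ⟨by omega, r2, ?_, r4⟩
        intro k hk1 hk2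
        by_cases hkm : k ≤ mid
        · calc PySem.List.pyGetD vals k 0 ≤ PySem.List.pyGetD vals mid 0 :=
                pv_sorted_mono vals hs k mid (by omega) hkm (by omega)
            _ < start := hv
        · exact r3 k (by omega) hk2
      · rw [if_neg hv]
        obtain ⟨r1, r2, r3, r4⟩ := ih lo mid (by omega) h0 (by omega) (by omega)
        refine ⟨r1, by omega, r3, ?_⟩
        intro k hk1 hk2
        by_cases hkm : mid ≤ k
        · calc start ≤ PySem.List.pyGetD vals mid 0 := not_lt.mp hv
            _ ≤ PySem.List.pyGetD vals k 0 := pv_sorted_mono vals hs mid k (by omega) hkm (by omega)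
        · exact r4 k hk1 (by omega)
    · rw [pvBisect, dif_neg h]
      exact ⟨le_refl _, hlh, fun k hk1 hk2 => by omega, fun k hk1 hk2 => by omega⟩

-- A's argmin expressed through a uniquely nearest anchor value
lemma pv_Acol_unique (anchors : List Int) (start v : Int) (k : Nat)
    (hk : PySem.List.index? anchors v = some k)
    (hmin : ∀ w ∈ anchors, |start - v| ≤ |start - w|)
    (huniq : ∀ w ∈ anchors, |start - w| = |start - v| → w = v) :
    PySem.List.minD (PySem.List.pyRange 0 (anchors.length : Int) 1)
      (fun i => |start - PySem.List.pyGetD anchors i 0|) 0 = (k : Int) := by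
  obtain ⟨hklen, hgk, hfirstocc⟩ := PySem.List.getElem_of_index?_eq_some hk
  apply pv_minD_range_eq
  · exact Int.natCast_nonneg k
  · exact_mod_cast hklen
  · intro j hj0 hjn
    have hj : j.toNat < anchors.length := by omega
    rw [PySem.List.pyGetD_eq_getElem anchors 0 (by omega) (by omega),
        PySem.List.pyGetD_eq_getElem anchors 0 hj0 hjn]
    simp only [Int.toNat_natCast, hgk]
    exact hmin _ (anchors.getElem_mem hj)
  · intro j hj0 hjk
    have hj : j.toNat < anchors.length := by omega
    rw [PySem.List.pyGetD_eq_getElem anchors 0 (by omega) (by omega),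
        PySem.List.pyGetD_eq_getElem anchors 0 hj0 (by omega)]
    simp only [Int.toNat_natCast, hgk]
    have hne : anchors[j.toNat] ≠ v := hfirstocc j.toNat (by omega)
    have hle := hmin _ (anchors.getElem_mem hj)
    rcases lt_or_eq_of_le hle with h | h
    · exact h
    · exact absurd (huniq _ (anchors.getElem_mem hj) h.symm) hne

-- A's argmin with exactly two equidistant nearest values
lemma pv_Acol_pair (anchors : List Int) (start v w : Int) (kv kw : Nat)
    (hkv : PySem.List.index? anchors v = some kv)
    (hkw : PySem.List.index? anchors w = some kw)
    (hd : |start - w| = |start - v|)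
    (hmin : ∀ u ∈ anchors, |start - v| ≤ |start - u|)
    (hpair : ∀ u ∈ anchors, |start - u| = |start - v| → u = v ∨ u = w) :
    PySem.List.minD (PySem.List.pyRange 0 (anchors.length : Int) 1)
      (fun i => |start - PySem.List.pyGetD anchors i 0|) 0 = min (kv : Int) (kw : Int) := by
  obtain ⟨hkvlen, hgv, hfv⟩ := PySem.List.getElem_of_index?_eq_some hkv
  obtain ⟨hkwlen, hgw, hfw⟩ := PySem.List.getElem_of_index?_eq_some hkw
  have key : ∀ (m : Nat) (hmlen : m < anchors.length), (anchors[m] = v ∨ anchors[m] = w) →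
      m ≤ kv → m ≤ kw →
      PySem.List.minD (PySem.List.pyRange 0 (anchors.length : Int) 1)
        (fun i => |start - PySem.List.pyGetD anchors i 0|) 0 = (m : Int) := by
    intro m hmlen hgm hmv hmw
    have hdm : |start - anchors[m]| = |start - v| := by
      rcases hgm with h | h <;> rw [h]
      exact hd
    apply pv_minD_range_eq
    · exact Int.natCast_nonneg m
    · exact_mod_cast hmlen
    · intro j hj0 hjn
      rw [PySem.List.pyGetD_eq_getElem anchors 0 (by omega) (by omega),
          PySem.List.pyGetD_eq_getElem anchors 0 hj0 hjn]
      simp only [Int.toNat_natCast]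
      rw [hdm]
      exact hmin _ (anchors.getElem_mem (by omega))
    · intro j hj0 hjm
      rw [PySem.List.pyGetD_eq_getElem anchors 0 (by omega) (by omega),
          PySem.List.pyGetD_eq_getElem anchors 0 hj0 (by omega)]
      simp only [Int.toNat_natCast]
      rw [hdm]
      have hj : j.toNat < anchors.length := by omega
      have hle := hmin _ (anchors.getElem_mem hj)
      rcases lt_or_eq_of_le hle with h | h
      · exact h
      · exfalso
        rcases hpair _ (anchors.getElem_mem hj) h.symm with he | he
        · exact hfv j.toNat (by omega) he
        · exact hfw j.toNat (by omega) he
  rcases Nat.le_total kv kw with h | h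
  · have hmeq : min (kv : Int) (kw : Int) = ((kv : Nat) : Int) := by omega
    rw [hmeq]
    exact key kv hkvlen (Or.inl hgv) (le_refl _) h
  · have hmeq : min (kv : Int) (kw : Int) = ((kw : Nat) : Int) := by omega
    rw [hmeq]
    exact key kw hkwlen (Or.inr hgw) h (le_refl _)

-- MAIN: per-segment column choice agrees
lemma pv_nearest_eq_minD (anchors : List Int) (h : anchors ≠ []) (start : Int) :
    pvNearest (PySem.List.sorted (pvFirstDict anchors).keys (fun x => x) false)
        (pvFirstDict anchors) start
      = PySem.List.minD (PySem.List.pyRange 0 (anchors.length : Int) 1)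
          (fun i => |start - PySem.List.pyGetD anchors i 0|) 0 := by
  have hkeys : (pvFirstDict anchors).keys = PySem.Set.ofList anchors := pv_firstDict_keys anchors
  set V : List Int := PySem.List.sorted (pvFirstDict anchors).keys (fun x => x) false with hVdef
  have hVdef' : V = PySem.List.sorted (PySem.Set.ofList anchors) (fun x => x) false := by
    rw [hVdef, hkeys]
  have hVs : V.Pairwise (· < ·) := by
    rw [hVdef']; exact PySem.List.sorted_ofList_pairwise_lt anchors
  have hVmem : ∀ x : Int, x ∈ V ↔ x ∈ anchors := by
    intro x
    rw [hVdef', PySem.List.mem_sorted, PySem.Set.mem_ofList]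
  have hVpos : 0 < V.length := by
    obtain ⟨a, ha⟩ := List.exists_mem_of_ne_nil anchors h
    exact List.length_pos_of_mem ((hVmem a).mpr ha)
  -- abs as max, so that omega can finish arithmetic goals
  have habs : ∀ z : Int, |start - z| = max (start - z) (z - start) := by
    intro z
    rcases le_total start z with hz | hz
    · rw [abs_of_nonpos (by omega)]; omega
    · rw [abs_of_nonneg (by omega)]; omega
  -- the binary search postcondition
  obtain ⟨hlo0, hlon, hlow, hhigh⟩ :=
    pv_bisect_spec V hVs start (V.length) 0 (V.length : Int) (by omega) (by omega)
      (by exact_mod_cast Int.natCast_nonneg V.length) (le_refl _)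
  set lo : Int := pvBisect V start 0 (V.length : Int) with hlodef
  have hlowN : ∀ (j : Nat) (hj : j < V.length), (j : Int) < lo → V[j] < start := by
    intro j hj hjlo
    have := hlow j (by omega) hjlo
    rw [PySem.List.pyGetD_eq_getElem V 0 (by omega) (by exact_mod_cast hj)] at this
    simpa using this
  have hhighN : ∀ (j : Nat) (hj : j < V.length), lo ≤ (j : Int) → start ≤ V[j] := by
    intro j hj hjlo
    have := hhigh j hjlo (by exact_mod_cast hj)
    rw [PySem.List.pyGetD_eq_getElem V 0 (by omega) (by exact_mod_cast hj)] at this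
    simpa using this
  have hmono : ∀ (p q : Nat) (hpq : p ≤ q) (hq : q < V.length),
      V[p]'(Nat.lt_of_le_of_lt hpq hq) ≤ V[q] := by
    intro p q hpq hq
    rcases Nat.eq_or_lt_of_le hpq with he | hlt
    · subst he; exact le_refl _
    · exact le_of_lt (List.pairwise_iff_getElem.mp hVs p q (by omega) hq hlt)
  -- membership of anchors values in V, with getD of the first dict
  have hgetD : ∀ w ∈ anchors, ∃ k : Nat, PySem.List.index? anchors w = some k ∧
      (pvFirstDict anchors).getD w 0 = (k : Int) := by
    intro w hw
    have hsome := (PySem.List.index?_isSome_iff anchors w).mpr hw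
    cases hk : PySem.List.index? anchors w with
    | none => rw [hk] at hsome; simp at hsome
    | some k => exact ⟨k, rfl, pv_firstDict_getD anchors w k hk⟩
  have hVidx : ∀ w ∈ anchors, ∃ (j : Nat) (hj : j < V.length), V[j] = w := by
    intro w hw
    exact List.getElem_of_mem ((hVmem w).mpr hw)
  rw [pvNearest]
  simp only []
  rw [← hlodef]
  by_cases hl0 : lo = 0
  · -- all anchors ≥ start; nearest is V[0]
    rw [if_pos hl0]
    have hg0 : PySem.List.pyGetD V 0 0 = V[0] := by
      rw [PySem.List.pyGetD_eq_getElem V 0 (by omega) (by exact_mod_cast hVpos)]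
      simp
    rw [hg0]
    have hv_mem : V[0] ∈ anchors := (hVmem _).mp (V.getElem_mem hVpos)
    obtain ⟨k, hk, hgd⟩ := hgetD _ hv_mem
    rw [hgd]
    refine (pv_Acol_unique anchors start V[0] k hk ?_ ?_).symm
    · intro w hw
      obtain ⟨j, hj, rfl⟩ := hVidx w hw
      have h0w : V[0] ≤ V[j] := hmono 0 j (by omega) hj
      have hsw : start ≤ V[j] := hhighN j hj (by omega)
      have hs0 : start ≤ V[0] := hhighN 0 hVpos (by omega)
      rw [habs, habs]; omega
    · intro w hw heq
      obtain ⟨j, hj, rfl⟩ := hVidx w hw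
      have h0w : V[0] ≤ V[j] := hmono 0 j (by omega) hj
      have hsw : start ≤ V[j] := hhighN j hj (by omega)
      have hs0 : start ≤ V[0] := hhighN 0 hVpos (by omega)
      rw [habs, habs] at heq; omega
  · rw [if_neg hl0]
    by_cases hln : lo = (V.length : Int)
    · -- all anchors < start; nearest is the last element of V
      rw [if_pos hln]
      have hlast : ((V.length : Int) - 1).toNat = V.length - 1 := by omega
      have hg1 : PySem.List.pyGetD V ((V.length : Int) - 1) 0 = V[V.length - 1] := by
        rw [PySem.List.pyGetD_eq_getElem V 0 (by omega) (by omega)]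
        congr 1
      have hv_mem : V[V.length - 1] ∈ anchors :=
        (hVmem _).mp (V.getElem_mem (by omega))
      rw [hg1]
      obtain ⟨k, hk, hgd⟩ := hgetD _ hv_mem
      rw [hgd]
      refine (pv_Acol_unique anchors start V[V.length - 1] k hk ?_ ?_).symm
      · intro w hw
        obtain ⟨j, hj, rfl⟩ := hVidx w hw
        have hwl : V[j] ≤ V[V.length - 1] := hmono j (V.length - 1) (by omega) (by omega)
        have hsw : V[j] < start := hlowN j hj (by omega)
        have hsl : V[V.length - 1] < start := hlowN (V.length - 1) (by omega) (by omega)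
        rw [habs, habs]; omega
      · intro w hw heq
        obtain ⟨j, hj, rfl⟩ := hVidx w hw
        have hwl : V[j] ≤ V[V.length - 1] := hmono j (V.length - 1) (by omega) (by omega)
        have hsw : V[j] < start := hlowN j hj (by omega)
        have hsl : V[V.length - 1] < start := hlowN (V.length - 1) (by omega) (by omega)
        rw [habs, habs] at heq; omega
    · -- 0 < lo < |V|: the two bracketing values a = V[lo-1], b = V[lo]
      rw [if_neg hln]
      have hlo1 : 0 < lo := by omega
      have hlolen : lo < (V.length : Int) := by
        rcases lt_or_eq_of_le hlon with hx | hx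
        · exact hx
        · exact absurd hx hln
      have hga : PySem.List.pyGetD V (lo - 1) 0 = V[(lo - 1).toNat] := by
        rw [PySem.List.pyGetD_eq_getElem V 0 (by omega) (by omega)]
      have hgb : PySem.List.pyGetD V lo 0 = V[lo.toNat] := by
        rw [PySem.List.pyGetD_eq_getElem V 0 (by omega) (by omega)]
      rw [hga, hgb]
      have hla : (lo - 1).toNat < V.length := by omega
      have hlb : lo.toNat < V.length := by omega
      have ha_mem : V[(lo - 1).toNat] ∈ anchors := (hVmem _).mp (V.getElem_mem hla)
      have hb_mem : V[lo.toNat] ∈ anchors := (hVmem _).mp (V.getElem_mem hlb)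
      have has : V[(lo - 1).toNat] < start := hlowN _ hla (by omega)
      have hbs : start ≤ V[lo.toNat] := hhighN _ hlb (by omega)
      have hab : V[(lo - 1).toNat] < V[lo.toNat] :=
        List.pairwise_iff_getElem.mp hVs _ _ hla hlb (by omega)
      -- every anchor value sits on one side of the bracket
      have hside : ∀ w ∈ anchors,
          (w ≤ V[(lo - 1).toNat] ∧ w < start) ∨ (V[lo.toNat] ≤ w ∧ start ≤ w) := by
        intro w hw
        obtain ⟨j, hj, rfl⟩ := hVidx w hw
        by_cases hjlo : (j : Int) < lo
        · exact Or.inl ⟨hmono j (lo - 1).toNat (by omega) hla, hlowN j hj hjlo⟩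
        · exact Or.inr ⟨hmono lo.toNat j (by omega) hj, hhighN j hj (by omega)⟩
      obtain ⟨ka, hka, hgda⟩ := hgetD _ ha_mem
      obtain ⟨kb, hkb, hgdb⟩ := hgetD _ hb_mem
      by_cases hda : start - V[(lo - 1).toNat] < V[lo.toNat] - start
      · rw [if_pos hda, hgda]
        refine (pv_Acol_unique anchors start V[(lo - 1).toNat] ka hka ?_ ?_).symm
        · intro w hw
          rcases hside w hw with ⟨h1, h2⟩ | ⟨h1, h2⟩ <;> (rw [habs, habs]; omega)
        · intro w hw heq
          rcases hside w hw with ⟨h1, h2⟩ | ⟨h1, h2⟩ <;> (rw [habs, habs] at heq; omega)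
      · rw [if_neg hda]
        by_cases hdb : V[lo.toNat] - start < start - V[(lo - 1).toNat]
        · rw [if_pos hdb, hgdb]
          refine (pv_Acol_unique anchors start V[lo.toNat] kb hkb ?_ ?_).symm
          · intro w hw
            rcases hside w hw with ⟨h1, h2⟩ | ⟨h1, h2⟩ <;> (rw [habs, habs]; omega)
          · intro w hw heq
            rcases hside w hw with ⟨h1, h2⟩ | ⟨h1, h2⟩ <;> (rw [habs, habs] at heq; omega)
        · rw [if_neg hdb, hgda, hgdb]
          refine (pv_Acol_pair anchors start V[(lo - 1).toNat] V[lo.toNat] ka kb hka hkb ?_ ?_ ?_).symm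
          · rw [habs, habs]; omega
          · intro u hu
            rcases hside u hu with ⟨h1, h2⟩ | ⟨h1, h2⟩ <;> (rw [habs, habs]; omega)
          · intro u hu heq
            rcases hside u hu with ⟨h1, h2⟩ | ⟨h1, h2⟩ <;> (rw [habs, habs] at heq; omega)

-- ===== VERDICT (by name: the statement is the Claim_ definition above) =====
theorem cells_from_anchors_py_spec : Claim_equal_cells_from_anchors_py := by
  intro segments anchors hdom hpre
  unfold Spec_cells_from_anchors_py
  by_cases h : anchors = []
  · rw [cells_from_anchors_py, cells_from_anchors_py_alt, if_pos h, if_pos h]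
  · rw [cells_from_anchors_py, cells_from_anchors_py_alt, if_neg h, if_neg h]
    simp only [pv_nearest_eq_minD anchors h]
    refine congrArg pvPopWhile ?_
    have hrep : (List.replicate anchors.length ("" : String))
        = (List.replicate anchors.length ([] : List String)).map
            (fun p => PySem.Str.join " " p) := by
      rw [List.map_replicate, pv_joinS_nil]
    rw [hrep]
    refine pv_fold_parts
      (fun seg => PySem.List.minD (PySem.List.pyRange 0 (anchors.length : Int) 1)
        (fun i => |pvStart seg - PySem.List.pyGetD anchors i 0|) 0)
      segments (List.replicate anchors.length []) ?_
    intro p hp t htp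
    rw [List.eq_of_mem_replicate hp] at htp
    simp at htp
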